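-- pv_equiv track=rewrite | github.com/MaciejKaca/Python | word_counter.py | word_counter2
-- ===== SOURCE A (Python) =====
-- def word_counter2(sentence):
--     new_sentence = "".join(c for c in sentence if (c.isalnum() or c.isspace()) )
--     another_chars = [c for c in sentence if not(c.isalnum() or c.isspace()) ]
--     dict = {}
--     for word in new_sentence.split():
--         if word in dict:
--             dict[word]+=1
--         else:
--             dict[word]=1
--
--     for word in another_chars:
--         if word in dict:
--             dict[word]+=1
--         else:
--             dict[word]=1
--     return dict
-- ===== SOURCE B (Python) =====
-- def word_counter2(sentence):
--     # single pass: word buffer + two disjoint count dicts (words first, then other chars)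
--     words = {}
--     specials = {}
--     buf = []
--     for c in sentence:
--         if c.isalnum():
--             buf.append(c)
--         elif c.isspace():
--             if buf:
--                 w = "".join(buf)
--                 words[w] = words.get(w, 0) + 1
--                 buf = []
--         else:
--             specials[c] = specials.get(c, 0) + 1
--     if buf:
--         w = "".join(buf)
--         words[w] = words.get(w, 0) + 1
--     return {**words, **specials}
-- ===== Notes on version B (the rewrite author's own statement) =====
-- stated objective: faster
-- what changed: A builds a filtered copy of the sentence, a punctuation list and then runs two counting loops (split words first, then the other characters); B is a single pass over the characters with a word buffer and two disjoint count dicts (words, specials) concatenated at the end.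
import Mathlib
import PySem

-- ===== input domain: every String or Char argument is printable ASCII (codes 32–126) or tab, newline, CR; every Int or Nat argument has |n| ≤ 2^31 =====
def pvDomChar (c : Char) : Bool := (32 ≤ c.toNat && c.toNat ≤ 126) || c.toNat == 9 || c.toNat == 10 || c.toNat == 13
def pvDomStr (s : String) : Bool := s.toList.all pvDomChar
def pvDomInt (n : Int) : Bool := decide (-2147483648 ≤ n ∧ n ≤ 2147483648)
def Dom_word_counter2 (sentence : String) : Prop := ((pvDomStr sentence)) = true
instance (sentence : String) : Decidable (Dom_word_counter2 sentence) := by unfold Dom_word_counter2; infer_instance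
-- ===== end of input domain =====

-- B replaces A's filter+split+two-loop construction by one single-pass state machine over the
-- characters (word buffer + two disjoint count dicts); alternative decomposition, same result.


-- ===== PORT A =====
def word_counter2 (sentence : String) : List (String × Int) :=
  let new_sentence : String :=
    PySem.Str.join "" ((sentence.toList.filter
      (fun c => PySem.Chars.isalnum c || PySem.Chars.isspace c)).map (fun c => String.ofList [c]))
  let another_chars : List String :=
    (sentence.toList.filter
      (fun c => !(PySem.Chars.isalnum c || PySem.Chars.isspace c))).map (fun c => String.ofList [c])
  let d : PySem.Dict String Int := PySem.Dict.empty
  let d := (PySem.Str.split₀ new_sentence).foldl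
    (fun d w => if d.contains w then d.insert w (d.getD w 0 + 1) else d.insert w 1) d
  let d := another_chars.foldl
    (fun d w => if d.contains w then d.insert w (d.getD w 0 + 1) else d.insert w 1) d
  d.items

-- ===== PORT B =====
-- state of B's single pass: (words dict, specials dict, current word buffer)
def wcStep (st : PySem.Dict String Int × PySem.Dict String Int × List Char) (c : Char) :
    PySem.Dict String Int × PySem.Dict String Int × List Char :=
  if PySem.Chars.isalnum c then (st.1, st.2.1, st.2.2 ++ [c])
  else if PySem.Chars.isspace c then
    (if st.2.2 = [] then st
     else (st.1.insert (String.ofList st.2.2) (st.1.getD (String.ofList st.2.2) 0 + 1), st.2.1, []))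
  else (st.1, st.2.1.insert (String.ofList [c]) (st.2.1.getD (String.ofList [c]) 0 + 1), st.2.2)

def word_counter2_alt (sentence : String) : List (String × Int) :=
  let st := sentence.toList.foldl wcStep (PySem.Dict.empty, PySem.Dict.empty, [])
  let words := if st.2.2 = [] then st.1
    else st.1.insert (String.ofList st.2.2) (st.1.getD (String.ofList st.2.2) 0 + 1)
  (words.update st.2.1.items).items

-- ===== PRECONDITION & SPEC =====
def Spec_word_counter2 (sentence : String) (out : List (String × Int)) : Prop := out = word_counter2_alt sentence
instance (sentence : String) (out : List (String × Int)) : Decidable (Spec_word_counter2 sentence out) := by unfold Spec_word_counter2; infer_instance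

-- ===== CLAIM (what is proved, stated in full; the proofs are below) =====
def Claim_equal_word_counter2 : Prop := ∀ (sentence : String), Dom_word_counter2 sentence → Spec_word_counter2 sentence (word_counter2 sentence)

-- ===== LEMMAS AND PROOFS =====

-- increment step shared by both counting loops
def wcBump (d : PySem.Dict String Int) (w : String) : PySem.Dict String Int :=
  d.insert w (d.getD w 0 + 1)

-- the word sequence B's machine emits from a given buffer (final flush included)
def msplit : List Char → List Char → List (List Char)
  | [], buf => if buf = [] then [] else [buf]
  | c :: r, buf =>
    if PySem.Chars.isalnum c then msplit r (buf ++ [c])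
    else if PySem.Chars.isspace c then (if buf = [] then msplit r [] else buf :: msplit r [])
    else msplit r buf

-- two dicts with disjoint keys laid side by side
def dcat (d e : PySem.Dict String Int) : PySem.Dict String Int := ⟨d.items ++ e.items⟩

theorem space_not_alnum (c : Char) (h : PySem.Chars.isspace c = true) :
    PySem.Chars.isalnum c = false := by
  have h1 : 'A'.val.toNat = 65 := by decide
  have h2 : 'Z'.val.toNat = 90 := by decide
  have h3 : 'a'.val.toNat = 97 := by decide
  have h4 : 'z'.val.toNat = 122 := by decide
  have h5 : '0'.val.toNat = 48 := by decide
  have h6 : '9'.val.toNat = 57 := by decide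
  simp only [PySem.Chars.isalnum, PySem.Chars.isalpha, PySem.Chars.isdigit, PySem.Chars.isspace,
    PySem.Chars.isupper, PySem.Chars.islower, Bool.or_eq_true, Bool.and_eq_true, decide_eq_true_eq,
    Bool.or_eq_false_iff, Bool.and_eq_false_iff, decide_eq_false_iff_not,
    Char.le_def, UInt32.le_iff_toNat_le, Char.toNat, h1, h2, h3, h4, h5, h6] at *
  omega

theorem astep_eq_bump :
    (fun (d : PySem.Dict String Int) w =>
      if d.contains w then d.insert w (d.getD w 0 + 1) else d.insert w 1) = wcBump := by
  funext d w
  by_cases h : d.contains w = true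
  · simp [h, wcBump]
  · simp only [Bool.not_eq_true] at h
    simp [h, wcBump, PySem.Dict.getD_of_not_contains (d := d) (k := w) (d0 := (0:Int)) h]

theorem go_eq_msplit (s cur : List Char) (acc : List (List Char))
    (h : ∀ c ∈ s, (PySem.Chars.isalnum c || PySem.Chars.isspace c) = true) :
    PySem.Chars.split₀.go s cur acc = acc.reverse ++ msplit s cur.reverse := by
  induction s generalizing cur acc with
  | nil =>
    by_cases hc : cur = []
    · simp [PySem.Chars.split₀.go, msplit, hc]
    · simp [PySem.Chars.split₀.go, msplit, hc, List.isEmpty_iff]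
  | cons c r ih =>
    have hk := h c (by simp)
    by_cases hs : PySem.Chars.isspace c = true
    · have ha := space_not_alnum c hs
      by_cases hc : cur = []
      · simp [PySem.Chars.split₀.go, msplit, hs, ha, hc,
          ih [] acc (fun x hx => h x (by simp [hx]))]
      · simp only [PySem.Chars.split₀.go, msplit, hs, ha, if_true, if_false, Bool.false_eq_true,
          List.isEmpty_iff, hc, List.reverse_eq_nil_iff]
        rw [ih [] (cur.reverse :: acc) (fun x hx => h x (by simp [hx]))]
        simp
    · have hs' : PySem.Chars.isspace c = false := by simpa using hs
      have ha : PySem.Chars.isalnum c = true := by simpa [hs'] using hk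
      simp only [PySem.Chars.split₀.go, msplit, hs', ha, if_true, if_false, Bool.false_eq_true]
      rw [ih (c :: cur) acc (fun x hx => h x (by simp [hx]))]
      simp

theorem msplit_filter (s buf : List Char) :
    msplit (s.filter (fun c => PySem.Chars.isalnum c || PySem.Chars.isspace c)) buf = msplit s buf := by
  induction s generalizing buf with
  | nil => rfl
  | cons c r ih =>
    by_cases ha : PySem.Chars.isalnum c = true
    · simp [msplit, ha, ih]
    · by_cases hs : PySem.Chars.isspace c = true
      · simp only [Bool.not_eq_true] at ha
        by_cases hb : buf = [] <;> simp [msplit, ha, hs, hb, ih]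
      · simp only [Bool.not_eq_true] at ha hs
        simp [msplit, ha, hs, ih]

theorem msplit_words_alnum (s buf : List Char) (hb : ∀ c ∈ buf, PySem.Chars.isalnum c = true) :
    ∀ w ∈ msplit s buf, w ≠ [] ∧ ∀ c ∈ w, PySem.Chars.isalnum c = true := by
  induction s generalizing buf with
  | nil =>
    intro w hw
    by_cases hbuf : buf = []
    · simp [msplit, hbuf] at hw
    · simp [msplit, hbuf] at hw
      subst hw; exact ⟨hbuf, hb⟩
  | cons c r ih =>
    intro w hw
    by_cases ha : PySem.Chars.isalnum c = true
    · refine ih (buf ++ [c]) (fun x hx => ?_) w (by simpa [msplit, ha] using hw)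
      rcases List.mem_append.mp hx with h' | h'
      · exact hb x h'
      · simp at h'; subst h'; exact ha
    · by_cases hs : PySem.Chars.isspace c = true
      · by_cases hbuf : buf = []
        · exact ih [] (by simp) w (by simpa [msplit, ha, hs, hbuf] using hw)
        · have hw' : w = buf ∨ w ∈ msplit r [] := by
            simpa [msplit, ha, hs, hbuf] using hw
          rcases hw' with h' | h'
          · subst h'; exact ⟨hbuf, hb⟩
          · exact ih [] (by simp) w h'
      · simp only [Bool.not_eq_true] at ha hs
        exact ih buf hb w (by simpa [msplit, ha, hs] using hw)

theorem machine_spec (s : List Char) (dw ds : PySem.Dict String Int) (buf : List Char) :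
    (if (s.foldl wcStep (dw, ds, buf)).2.2 = [] then (s.foldl wcStep (dw, ds, buf)).1
      else wcBump (s.foldl wcStep (dw, ds, buf)).1 (String.ofList (s.foldl wcStep (dw, ds, buf)).2.2))
        = ((msplit s buf).map String.ofList).foldl wcBump dw
    ∧ (s.foldl wcStep (dw, ds, buf)).2.1
        = ((s.filter (fun c => !(PySem.Chars.isalnum c || PySem.Chars.isspace c))).map
            (fun c => String.ofList [c])).foldl wcBump ds := by
  induction s generalizing dw ds buf with
  | nil =>
    by_cases hb : buf = [] <;> simp [msplit, hb, wcBump]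
  | cons c r ih =>
    by_cases ha : PySem.Chars.isalnum c = true
    · simpa [wcStep, msplit, ha] using ih dw ds (buf ++ [c])
    · by_cases hs : PySem.Chars.isspace c = true
      · by_cases hb : buf = []
        · simpa [wcStep, msplit, ha, hs, hb] using ih dw ds []
        · simpa [wcStep, msplit, ha, hs, hb, wcBump] using ih (wcBump dw (String.ofList buf)) ds []
      · simp only [Bool.not_eq_true] at ha hs
        simpa [wcStep, msplit, ha, hs, wcBump] using
          ih dw (wcBump ds (String.ofList [c])) buf

theorem bump_dcat (d e : PySem.Dict String Int) (w : String) (h : d.contains w = false) :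
    wcBump (dcat d e) w = dcat d (wcBump e w) := by
  have hd : (d.items.any fun p => p.1 == w) = false := by
    simpa only [PySem.Dict.contains] using h
  have hall : ∀ p ∈ d.items, ¬ (p.1 == w) = true := List.any_eq_false.mp hd
  have hfind : d.items.find? (fun p => p.1 == w) = none :=
    List.find?_eq_none.mpr hall
  have hget : (PySem.Dict.mk (d.items ++ e.items)).get? w = e.get? w := by
    simp [PySem.Dict.get?, List.find?_append, hfind]
  have hmap : ∀ (v : Int),
      d.items.map (fun p => if (p.1 == w) = true then (w, v) else p) = d.items := by
    intro v
    calc d.items.map (fun p => if (p.1 == w) = true then (w, v) else p)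
        = d.items.map id := List.map_congr_left (fun p hp => by simp [hall p hp])
      _ = d.items := List.map_id _
  by_cases he : (e.items.any fun p => p.1 == w) = true
  · simp only [wcBump, PySem.Dict.insert, PySem.Dict.contains, dcat, List.any_append, hd,
      Bool.false_or, he, if_true, PySem.Dict.getD, List.map_append]
    rw [show ({ items := d.items ++ e.items } : PySem.Dict String Int) = PySem.Dict.mk (d.items ++ e.items) from rfl, hget]
    rw [hmap]
  · simp only [Bool.not_eq_true] at he
    simp only [wcBump, PySem.Dict.insert, PySem.Dict.contains, dcat, List.any_append, hd,
      Bool.false_or, he, if_false, Bool.false_eq_true, PySem.Dict.getD, List.append_assoc]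
    rw [show ({ items := d.items ++ e.items } : PySem.Dict String Int) = PySem.Dict.mk (d.items ++ e.items) from rfl, hget]

theorem foldl_bump_dcat (W : List String) (d e : PySem.Dict String Int)
    (h : ∀ w ∈ W, d.contains w = false) :
    W.foldl wcBump (dcat d e) = dcat d (W.foldl wcBump e) := by
  induction W generalizing e with
  | nil => rfl
  | cons w W ih =>
    simp only [List.foldl_cons, bump_dcat d e w (h w (by simp))]
    exact ih _ (fun x hx => h x (by simp [hx]))

-- ===== VERDICT (by name: the statement is the Claim_ definition above) =====
theorem word_counter2_spec : Claim_equal_word_counter2 := by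
  intro sentence _
  unfold Spec_word_counter2 word_counter2 word_counter2_alt
  simp only []
  set s := sentence.toList with hsdef
  -- names
  set W : List String := (msplit s []).map String.ofList with hW
  set C : List String :=
    (s.filter (fun c => !(PySem.Chars.isalnum c || PySem.Chars.isspace c))).map
      (fun c => String.ofList [c]) with hC
  set dwords : PySem.Dict String Int := W.foldl wcBump PySem.Dict.empty with hdwords
  set dspec : PySem.Dict String Int := C.foldl wcBump PySem.Dict.empty with hdspec
  -- A's new_sentence, as a char list, is the kept characters
  have hns : (PySem.Str.join "" ((s.filter
      (fun c => PySem.Chars.isalnum c || PySem.Chars.isspace c)).map (fun c => String.ofList [c]))).toList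
      = s.filter (fun c => PySem.Chars.isalnum c || PySem.Chars.isspace c) := by
    rw [PySem.Str.toList_join]
    have : (List.map String.toList ((s.filter
        (fun c => PySem.Chars.isalnum c || PySem.Chars.isspace c)).map (fun c => String.ofList [c])))
        = (s.filter (fun c => PySem.Chars.isalnum c || PySem.Chars.isspace c)).map (fun c => [c]) := by
      simp [List.map_map, Function.comp]
    rw [this]
    simpa using PySem.Chars.join_nil_singletons _
  -- A's split list is B's machine word list
  have hsplit : PySem.Str.split₀ (PySem.Str.join "" ((s.filter
      (fun c => PySem.Chars.isalnum c || PySem.Chars.isspace c)).map (fun c => String.ofList [c]))) = W := by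
    unfold PySem.Str.split₀
    rw [hns]
    unfold PySem.Chars.split₀
    rw [go_eq_msplit _ [] [] (fun c hc => (List.mem_filter.mp hc).2)]
    simp [msplit_filter, hW]
  -- every machine word is a nonempty all-alnum string; the special keys are single non-alnum chars
  have hwordkeys : ∀ w ∈ W, ∃ u, w = String.ofList u ∧ u ≠ [] ∧ ∀ c ∈ u, PySem.Chars.isalnum c = true := by
    intro w hw
    rcases List.mem_map.mp hw with ⟨u, hu, rfl⟩
    exact ⟨u, rfl, msplit_words_alnum s [] (by simp) u hu⟩
  have hdis : ∀ w ∈ C, dwords.contains w = false := by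
    intro w hwC
    rcases List.mem_map.mp hwC with ⟨c, hc, rfl⟩
    have hcna : PySem.Chars.isalnum c = false := by
      have := (List.mem_filter.mp hc).2
      simp only [Bool.not_eq_true', Bool.or_eq_false_iff] at this
      exact this.1
    by_contra hcontr
    have hcontains : dwords.contains (String.ofList [c]) = true := by
      simpa using hcontr
    have hkeys : dwords.keys = PySem.Set.update (PySem.Dict.empty : PySem.Dict String Int).keys W := by
      rw [hdwords]
      exact PySem.Dict.keys_foldl_insert W (fun d x => d.getD x 0 + 1) PySem.Dict.empty
    have hmem : String.ofList [c] ∈ W := by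
      have := (PySem.Dict.contains_iff_mem_keys dwords (String.ofList [c])).mp hcontains
      rw [hkeys, PySem.Dict.keys_empty, PySem.Set.update_nil_left] at this
      exact (PySem.Set.mem_ofList W _).mp this
    rcases hwordkeys _ hmem with ⟨u, hu, hne, hall⟩
    have : [c] = u := by
      have := congrArg String.toList hu
      simpa using this
    have : PySem.Chars.isalnum c = true := hall c (by rw [← this]; simp)
    simp [hcna] at this
  -- A's result
  have hA : (C.foldl (fun d w => if d.contains w then d.insert w (d.getD w 0 + 1) else d.insert w 1)
      ((PySem.Str.split₀ (PySem.Str.join "" ((s.filter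
        (fun c => PySem.Chars.isalnum c || PySem.Chars.isspace c)).map (fun c => String.ofList [c])))).foldl
        (fun d w => if d.contains w then d.insert w (d.getD w 0 + 1) else d.insert w 1)
        PySem.Dict.empty)).items = dwords.items ++ dspec.items := by
    rw [astep_eq_bump, hsplit, ← hdwords]
    have hid : dcat dwords PySem.Dict.empty = dwords := by
      cases dwords with
      | mk items => simp [dcat, PySem.Dict.empty]
    conv_lhs => rw [← hid]
    rw [foldl_bump_dcat C dwords PySem.Dict.empty hdis, ← hdspec]
    simp [dcat]
  -- B's result
  have hmach := machine_spec s PySem.Dict.empty PySem.Dict.empty []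
  have hBwords : (if (s.foldl wcStep (PySem.Dict.empty, PySem.Dict.empty, [])).2.2 = []
      then (s.foldl wcStep (PySem.Dict.empty, PySem.Dict.empty, [])).1
      else (s.foldl wcStep (PySem.Dict.empty, PySem.Dict.empty, [])).1.insert
        (String.ofList (s.foldl wcStep (PySem.Dict.empty, PySem.Dict.empty, [])).2.2)
        ((s.foldl wcStep (PySem.Dict.empty, PySem.Dict.empty, [])).1.getD
          (String.ofList (s.foldl wcStep (PySem.Dict.empty, PySem.Dict.empty, [])).2.2) 0 + 1)) = dwords := by
    rw [hdwords, hW]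
    exact hmach.1
  have hBspec : (s.foldl wcStep (PySem.Dict.empty, PySem.Dict.empty, [])).2.1 = dspec := by
    rw [hdspec, hC]
    exact hmach.2
  rw [hA, hBwords, hBspec]
  -- the final update appends the fresh special keys
  have hspeckeys : dspec.keys = PySem.Set.ofList C := by
    rw [hdspec]
    have h' := PySem.Dict.keys_foldl_insert C (fun d x => d.getD x 0 + 1)
      (PySem.Dict.empty (κ := String) (ν := Int))
    rw [PySem.Dict.keys_empty, PySem.Set.update_nil_left] at h'
    exact h'
  have hfresh : ∀ a ∈ dspec.items, dwords.contains a.1 = false := by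
    intro a ha
    apply hdis
    have : a.1 ∈ dspec.keys := List.mem_map.mpr ⟨a, ha, rfl⟩
    rw [hspeckeys] at this
    exact (PySem.Set.mem_ofList C _).mp this
  have hnodup : (dspec.items.map Prod.fst).Nodup := by
    have : dspec.keys.Nodup := by
      rw [hdspec]
      exact PySem.Dict.nodup_keys_foldl_insert C (fun d x => d.getD x 0 + 1) PySem.Dict.empty
        (by simp [PySem.Dict.keys_empty])
    simpa [PySem.Dict.keys] using this
  have := PySem.Dict.items_foldl_insert_fresh dspec.items Prod.fst Prod.snd dwords hfresh hnodup
  unfold PySem.Dict.update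
  rw [show (fun (acc : PySem.Dict String Int) (p : String × Int) => acc.insert p.1 p.2)
      = (fun (d : PySem.Dict String Int) (a : String × Int) => d.insert (Prod.fst a) (Prod.snd a)) from rfl]
  rw [this]
  simp
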